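-- pv_equiv track=rewrite | github.com/tzookb/programming-challenges | exercises/codility/PrefixSums/GenomicRangeQuery/sol.py | solution
-- ===== SOURCE A (Python) =====
-- def getIdx(char):
--   items = {
--     "A": 0,
--     "C": 1,
--     "G": 2,
--     "T": 3,
--   }
--   return items[char]
--
-- def get_min(arr, counters, start, end):
--   last_char = arr[end]
--   if last_char == "A" or ((counters[end][0] - counters[start][0]) > 0):
--     return 1
--   if last_char == "C" or ((counters[end][1] - counters[start][1]) > 0):
--     return 2
--   if last_char == "G" or ((counters[end][2] - counters[start][2]) > 0):
--     return 3
--   if last_char == "T" or ((counters[end][3] - counters[start][3]) > 0):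
--     return 4
--
-- def solution(S, P, Q):
--   result = []
--   counters = [[0]*4]*len(S)
--   for idx, _ in enumerate(S):
--     if idx == 0:
--       continue
--     prev_char = S[idx-1]
--     curSumArr = counters[idx-1][:]
--     curSumArr[getIdx(prev_char)] += 1
--     counters[idx] = curSumArr
--
--   for idx, start in enumerate(P):
--     end = Q[idx]
--     sol = get_min(S, counters, start, end)
--     result.append(sol)
--
--   return result
-- ===== SOURCE B (Python) =====
-- def solution(S, P, Q):
--     factor = {'A': 1, 'C': 2, 'G': 3, 'T': 4}
--     return [min(factor[c] for c in S[p:q + 1] if c in factor) for p, q in zip(P, Q)]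
-- ===== Notes on version B (the rewrite author's own statement) =====
-- stated objective: simpler
-- what changed: Replaced the prefix-sum counters table and branchy get_min with a direct per-query scan: map each ACGT nucleotide of the inclusive slice S[p:q+1] to its impact factor and take min.
-- outside the precondition, e.g. on solution('ACT', [-1], [-1]): A returns [4], B raises ValueError; on solution('ACT', [2], [1]): A returns [2], B raises ValueError; on solution('AX', [1], [1]): A returns [None], B raises ValueError
import Mathlib
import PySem

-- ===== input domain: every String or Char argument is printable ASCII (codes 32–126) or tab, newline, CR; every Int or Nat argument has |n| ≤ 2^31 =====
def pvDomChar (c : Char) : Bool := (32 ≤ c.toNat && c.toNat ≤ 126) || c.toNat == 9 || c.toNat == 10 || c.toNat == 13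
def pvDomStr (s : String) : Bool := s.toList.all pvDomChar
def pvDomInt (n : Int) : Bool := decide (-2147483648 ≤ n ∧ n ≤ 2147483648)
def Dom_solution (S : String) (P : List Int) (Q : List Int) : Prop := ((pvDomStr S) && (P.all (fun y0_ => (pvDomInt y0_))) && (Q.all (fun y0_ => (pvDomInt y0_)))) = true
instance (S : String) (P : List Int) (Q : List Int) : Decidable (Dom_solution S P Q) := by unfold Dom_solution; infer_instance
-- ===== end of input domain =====

-- B answers each query by scanning its inclusive substring directly instead of building A's prefix-sum counters table: simpler, not faster.

-- ===== PORT A =====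
-- getIdx: Python dict lookup; a KeyError char (outside "ACGT") is excluded by Pre_solution (0 is a junk default there)
def pvGetIdx (c : Char) : Nat :=
  if c = 'A' then 0 else if c = 'C' then 1 else if c = 'G' then 2 else if c = 'T' then 3 else 0

-- get_min: under Pre_solution indices are in range and nonnegative (getD/toNat are exact there);
-- the Python falls through returning None when no branch fires — excluded by Pre_solution (0 is a junk default)
def pvGetMin (arr : List Char) (counters : List (List Int)) (start fin : Int) : Int :=
  let lastChar := arr.getD fin.toNat ' '
  let ce := counters.getD fin.toNat []
  let cst := counters.getD start.toNat []
  if lastChar = 'A' ∨ (ce.getD 0 0 - cst.getD 0 0) > 0 then 1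
  else if lastChar = 'C' ∨ (ce.getD 1 0 - cst.getD 1 0) > 0 then 2
  else if lastChar = 'G' ∨ (ce.getD 2 0 - cst.getD 2 0) > 0 then 3
  else if lastChar = 'T' ∨ (ce.getD 3 0 - cst.getD 3 0) > 0 then 4
  else 0

def solution (S : String) (P : List Int) (Q : List Int) : List Int :=
  let cs := S.toList
  -- counters = [[0]*4]*len(S); the loop overwrites counters[idx] with a fresh copy, so no aliasing is observable
  let counters0 : List (List Int) := List.replicate cs.length [0, 0, 0, 0]
  let counters := (List.range cs.length).foldl (fun counters idx =>
    if idx = 0 then counters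
    else
      let prevChar := cs.getD (idx - 1) ' '
      let cur := counters.getD (idx - 1) []
      let cur2 := cur.set (pvGetIdx prevChar) (cur.getD (pvGetIdx prevChar) 0 + 1)
      counters.set idx cur2) counters0
  -- Q[idx] is in range under Pre_solution (len(P) ≤ len(Q)), so getD with a junk default is exact
  (PySem.List.enumerate P 0).foldl (fun result p =>
    result ++ [pvGetMin cs counters p.2 (PySem.List.pyGetD Q p.1 0)]) []

-- ===== PORT B =====
-- factor dict: pvFactor is the value lookup, pvInFactor the 'c in factor' membership test
def pvFactor (c : Char) : Int :=
  if c = 'A' then 1 else if c = 'C' then 2 else if c = 'G' then 3 else if c = 'T' then 4 else 0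

def pvInFactor (c : Char) : Bool :=
  c == 'A' || c == 'C' || c == 'G' || c == 'T'

-- min() of an empty generator raises ValueError in Python — excluded by Pre_solution (getD 0 is a junk default)
def solution_alt (S : String) (P : List Int) (Q : List Int) : List Int :=
  (P.zip Q).map (fun pq =>
    ((((PySem.List.slice S.toList (some pq.1) (some (pq.2 + 1))).filter pvInFactor).map pvFactor
      |> (PySem.List.min? · (fun x => x))).getD 0))

-- ===== PRECONDITION & SPEC =====
-- Pre_ excludes inputs where A raises (a non-ACGT character before S's last position: KeyError in the
-- counter build; len(P) > len(Q): IndexError; a start index below -len(S): IndexError), single-cell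
-- queries on a non-ACGT final character, where A returns None — not an int — and B's min() raises
-- ValueError, and negative, reversed or otherwise out-of-range query bounds, where A's Python
-- negative-index wraparound into the counters table is accidental and B's slice-based scan either
-- raises ValueError on the resulting empty slice or coincides only through the same wraparound.
def Pre_solution (S : String) (P : List Int) (Q : List Int) : Prop :=
  (S.toList.dropLast.all pvInFactor) = true ∧
  P.length ≤ Q.length ∧
  (∀ i, i < P.length → 0 ≤ P.getD i 0 ∧ P.getD i 0 ≤ Q.getD i 0 ∧ Q.getD i 0 < (S.toList.length : Int) ∧
    (P.getD i 0 < Q.getD i 0 ∨ pvInFactor (S.toList.getD (Q.getD i 0).toNat ' ') = true))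
instance (S : String) (P : List Int) (Q : List Int) : Decidable (Pre_solution S P Q) := by
  unfold Pre_solution; infer_instance

def pvWitness_solution : String × List Int × List Int := ("CAGCCTA", [2, 5, 0], [4, 5, 6])

def Spec_solution (S : String) (P : List Int) (Q : List Int) (out : List Int) : Prop := out = solution_alt S P Q
instance (S : String) (P : List Int) (Q : List Int) (out : List Int) : Decidable (Spec_solution S P Q out) := by unfold Spec_solution; infer_instance

-- ===== CLAIM (what is proved, stated in full; the proofs are below) =====
def Claim_equal_solution : Prop := ∀ (S : String) (P : List Int) (Q : List Int), Dom_solution S P Q → Pre_solution S P Q → Spec_solution S P Q (solution S P Q)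

-- ===== LEMMAS AND PROOFS =====

-- the four prefix counters A maintains for the first j characters
def pcounts (cs : List Char) (j : Nat) : List Int :=
  [((cs.take j).count 'A' : Int), ((cs.take j).count 'C' : Int),
   ((cs.take j).count 'G' : Int), ((cs.take j).count 'T' : Int)]

-- common spec: minimal impact factor among the ACGT chars of a segment (5 = sentinel for "none present")
def gm5 (l : List Char) : Int :=
  if 'A' ∈ l then 1 else if 'C' ∈ l then 2 else if 'G' ∈ l then 3 else if 'T' ∈ l then 4 else 5

lemma gm5_bounds (l : List Char) : 1 ≤ gm5 l ∧ gm5 l ≤ 5 := by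
  unfold gm5; split_ifs <;> omega

lemma gm5_cons (c : Char) (t : List Char)
    (hc : c = 'A' ∨ c = 'C' ∨ c = 'G' ∨ c = 'T') :
    gm5 (c :: t) = min (pvFactor c) (gm5 t) := by
  have hb := gm5_bounds t
  rcases hc with h | h | h | h <;> subst h <;>
    simp only [gm5, pvFactor, List.mem_cons] <;>
    split_ifs <;> simp_all

-- filtering to ACGT chars does not change gm5 (membership of each nucleotide is preserved)
lemma gm5_filter (l : List Char) : gm5 (l.filter pvInFactor) = gm5 l := by
  simp [gm5, List.mem_filter, pvInFactor]

lemma foldl_min_factor (t : List Char) (a : Int) (ha : 1 ≤ a ∧ a ≤ 4)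
    (hall : ∀ c ∈ t, c = 'A' ∨ c = 'C' ∨ c = 'G' ∨ c = 'T') :
    (t.map pvFactor).foldl min a = min a (gm5 t) := by
  induction t generalizing a with
  | nil => simp [gm5]; omega
  | cons c t ih =>
    have hc := hall c (List.mem_cons_self ..)
    have hf : 1 ≤ pvFactor c ∧ pvFactor c ≤ 4 := by
      rcases hc with h | h | h | h <;> subst h <;> simp [pvFactor]
    have : (List.map pvFactor (c :: t)).foldl min a
        = (t.map pvFactor).foldl min (min a (pvFactor c)) := by simp
    rw [this, ih (min a (pvFactor c)) (by omega)
          (fun x hx => hall x (List.mem_cons_of_mem _ hx)),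
        gm5_cons c t hc]
    omega

lemma inFactor_cases (c : Char) (h : pvInFactor c = true) :
    c = 'A' ∨ c = 'C' ∨ c = 'G' ∨ c = 'T' := by
  simp [pvInFactor] at h; tauto

-- B's per-query value equals gm5 of the unfiltered slice, given the filtered slice is nonempty
lemma bval_eq_gm5 (sub : List Char) (hne : sub.filter pvInFactor ≠ []) :
    (((sub.filter pvInFactor).map pvFactor |> (PySem.List.min? · (fun x => x)))).getD 0 = gm5 sub := by
  rcases hx : sub.filter pvInFactor with _ | ⟨x, t⟩
  · exact absurd hx hne
  · have hall : ∀ c ∈ x :: t, c = 'A' ∨ c = 'C' ∨ c = 'G' ∨ c = 'T' := by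
      intro c hc
      exact inFactor_cases c (List.of_mem_filter (hx ▸ hc))
    have hxc := hall x (List.mem_cons_self ..)
    have hf : 1 ≤ pvFactor x ∧ pvFactor x ≤ 4 := by
      rcases hxc with h | h | h | h <;> subst h <;> simp [pvFactor]
    rw [← gm5_filter sub, hx]
    simp only [List.map_cons, PySem.List.min?_id_cons, Option.getD_some]
    rw [foldl_min_factor t (pvFactor x) hf
          (fun c hc => hall c (List.mem_cons_of_mem _ hc)),
        ← gm5_cons x t hxc]

-- bump lemma: incrementing the counter of cs[k-1] advances pcounts from k-1 to k
lemma getElem_mem_dropLast {α : Type} (l : List α) (i : Nat) (h : i + 1 < l.length) :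
    l[i] ∈ l.dropLast := by
  have hi : i < l.dropLast.length := by simp [List.length_dropLast]; omega
  have hm := List.getElem_mem hi
  rwa [List.getElem_dropLast] at hm

lemma pcounts_bump (cs : List Char) (k : Nat) (hk : 1 ≤ k) (hkn : k < cs.length)
    (hdl : ∀ c ∈ cs.dropLast, c = 'A' ∨ c = 'C' ∨ c = 'G' ∨ c = 'T') :
    (pcounts cs (k - 1)).set (pvGetIdx (cs.getD (k - 1) ' '))
      ((pcounts cs (k - 1)).getD (pvGetIdx (cs.getD (k - 1) ' ')) 0 + 1)
    = pcounts cs k := by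
  obtain ⟨k', rfl⟩ : ∃ k', k = k' + 1 := ⟨k - 1, by omega⟩
  simp only [Nat.add_sub_cancel]
  have hlt : k' < cs.length := by omega
  have htake : cs.take (k' + 1) = cs.take k' ++ [cs[k']] := by
    rw [List.take_succ, List.getElem?_eq_getElem hlt]; simp
  have hg2 : cs[k']? = some cs[k'] := List.getElem?_eq_getElem hlt
  have hc := hdl _ (getElem_mem_dropLast cs k' (by omega))
  rcases hc with h | h | h | h <;>
    simp [pcounts, hg2, htake, pvGetIdx, h, List.count_append]

lemma getD_set_self_lem {α : Type} (l : List α) (i : Nat) (v d : α) (h : i < l.length) :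
    (l.set i v).getD i d = v := by
  simp [List.getD, h]

lemma getD_set_ne_lem {α : Type} (l : List α) (i j : Nat) (v d : α) (h : i ≠ j) :
    (l.set i v).getD j d = l.getD j d := by
  simp [List.getD, List.getElem?_set_ne h]

-- invariant of A's counter-building fold, by induction on the processed prefix of range(len(S))
lemma counters_inv (cs : List Char)
    (hdl : ∀ c ∈ cs.dropLast, c = 'A' ∨ c = 'C' ∨ c = 'G' ∨ c = 'T') (k : Nat) (hk : k ≤ cs.length) :
    (((List.range k).foldl (fun counters idx =>
      if idx = 0 then counters
      else
        counters.set idx ((counters.getD (idx - 1) []).set (pvGetIdx (cs.getD (idx - 1) ' '))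
          ((counters.getD (idx - 1) []).getD (pvGetIdx (cs.getD (idx - 1) ' ')) 0 + 1))) (List.replicate cs.length ([0, 0, 0, 0] : List Int)))).length = cs.length ∧
    ∀ j, j < cs.length → (((List.range k).foldl (fun counters idx =>
      if idx = 0 then counters
      else
        counters.set idx ((counters.getD (idx - 1) []).set (pvGetIdx (cs.getD (idx - 1) ' '))
          ((counters.getD (idx - 1) []).getD (pvGetIdx (cs.getD (idx - 1) ' ')) 0 + 1))) (List.replicate cs.length ([0, 0, 0, 0] : List Int)))).getD j []
      = if j < k then pcounts cs j else [0, 0, 0, 0] := by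
  induction k with
  | zero =>
    refine ⟨by simp, fun j hj => ?_⟩
    simp [hj]
  | succ k ih =>
    obtain ⟨hlen, hinv⟩ := ih (by omega)
    rw [List.range_succ]
    simp only [List.foldl_append, List.foldl_cons, List.foldl_nil]
    by_cases hk0 : k = 0
    · subst hk0
      refine ⟨by simpa using hlen, fun j hj => ?_⟩
      rw [if_pos rfl, hinv j hj, if_neg (by omega)]
      rcases Nat.eq_zero_or_pos j with h1 | h1
      · subst h1; simp [pcounts]
      · rw [if_neg (by omega)]
    · simp only [if_neg hk0]
      refine ⟨by simpa using hlen, fun j hj => ?_⟩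
      by_cases hjk : j = k
      · subst hjk
        rw [getD_set_self_lem]
        · rw [hinv (j - 1) (by omega), if_pos (by omega),
              pcounts_bump cs j (by omega) (by omega) hdl, if_pos (by omega)]
        · exact hj.trans_eq hlen.symm
      · rw [getD_set_ne_lem _ _ _ _ _ (fun h => hjk h.symm)]
        rw [hinv j hj]
        rcases Nat.lt_or_ge j k with h1 | h1
        · rw [if_pos h1, if_pos (by omega)]
        · rw [if_neg (by omega), if_neg (by omega)]

lemma counters_spec (cs : List Char)
    (hdl : ∀ c ∈ cs.dropLast, c = 'A' ∨ c = 'C' ∨ c = 'G' ∨ c = 'T') (j : Nat) (hj : j < cs.length) :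
    (((List.range cs.length).foldl (fun counters idx =>
      if idx = 0 then counters
      else
        counters.set idx ((counters.getD (idx - 1) []).set (pvGetIdx (cs.getD (idx - 1) ' '))
          ((counters.getD (idx - 1) []).getD (pvGetIdx (cs.getD (idx - 1) ' ')) 0 + 1))) (List.replicate cs.length [0, 0, 0, 0]))).getD j []
    = pcounts cs j := by
  have h := (counters_inv cs hdl cs.length le_rfl).2 j hj
  rwa [if_pos hj] at h

lemma slice_decomp (cs : List Char) (p q : Int)
    (hp : 0 ≤ p) (hpq : p ≤ q) (hq : q < (cs.length : Int)) :
    PySem.List.slice cs (some p) (some (q + 1))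
      = (cs.take q.toNat).drop p.toNat ++ [cs[q.toNat]'(by omega)] := by
  obtain ⟨pn, rfl⟩ : ∃ pn : Nat, p = (pn : Int) := ⟨p.toNat, (Int.toNat_of_nonneg hp).symm⟩
  obtain ⟨qn, rfl⟩ : ∃ qn : Nat, q = (qn : Int) := ⟨q.toNat, (Int.toNat_of_nonneg (by omega)).symm⟩
  have hpq' : pn ≤ qn := by exact_mod_cast hpq
  have hq' : qn < cs.length := by exact_mod_cast hq
  simp only [Int.toNat_natCast]
  rw [show ((qn : Int) + 1) = ((qn + 1 : Nat) : Int) by push_cast; ring,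
      PySem.List.slice_natCast, List.drop_take,
      show qn + 1 - pn = (qn - pn) + 1 by omega, List.take_succ,
      List.getElem?_drop, show pn + (qn - pn) = qn by omega, List.getElem?_eq_getElem hq']
  simp

-- chars strictly before index q are in dropLast
lemma mem_take_dropLast (cs : List Char) (k : Nat) (hk : k + 1 ≤ cs.length) {c : Char}
    (hc : c ∈ cs.take k) : c ∈ cs.dropLast := by
  rw [List.dropLast_eq_take]
  have : cs.take k = (cs.take (cs.length - 1)).take k := by
    rw [List.take_take, min_eq_left (by omega)]
  rw [this] at hc
  exact List.mem_of_mem_take hc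

-- per-query: A's counter differencing equals the minimal factor of the inclusive slice
lemma getmin_eq (cs : List Char) (C : List (List Int))
    (hC : ∀ j, j < cs.length → C.getD j [] = pcounts cs j)
    (hdl : ∀ c ∈ cs.dropLast, c = 'A' ∨ c = 'C' ∨ c = 'G' ∨ c = 'T') (p q : Int)
    (hp : 0 ≤ p) (hpq : p ≤ q) (hq : q < (cs.length : Int))
    (hcnd : p < q ∨ pvInFactor (cs.getD q.toNat ' ') = true) :
    pvGetMin cs C p q = gm5 (PySem.List.slice cs (some p) (some (q + 1))) := by
  obtain ⟨pn, rfl⟩ : ∃ pn : Nat, p = (pn : Int) := ⟨p.toNat, (Int.toNat_of_nonneg hp).symm⟩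
  obtain ⟨qn, rfl⟩ : ∃ qn : Nat, q = (qn : Int) := ⟨q.toNat, (Int.toNat_of_nonneg (by omega)).symm⟩
  have hpq' : pn ≤ qn := by exact_mod_cast hpq
  have hq' : qn < cs.length := by exact_mod_cast hq
  have hsub : PySem.List.slice cs (some (pn : Int)) (some ((qn : Int) + 1))
      = (cs.take qn).drop pn ++ [cs[qn]] := by
    have h := slice_decomp cs pn qn (by positivity) hpq hq
    simpa using h
  have htake : cs.take qn = cs.take pn ++ (cs.take qn).drop pn := by
    conv_lhs => rw [← List.take_append_drop pn (cs.take qn)]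
    rw [List.take_take, min_eq_left hpq']
  have hcond : ∀ ch : Char, (cs[qn] = ch ∨
      (((cs.take qn).count ch : Int) - ((cs.take pn).count ch : Int) > 0)) ↔
      ch ∈ (cs.take qn).drop pn ++ [cs[qn]] := by
    intro ch
    have hcnt : (cs.take qn).count ch = (cs.take pn).count ch + ((cs.take qn).drop pn).count ch := by
      conv_lhs => rw [htake]
      rw [List.count_append]
    have hmem : (0 < ((cs.take qn).drop pn).count ch) ↔ ch ∈ (cs.take qn).drop pn :=
      List.count_pos_iff
    rw [List.mem_append, List.mem_singleton]
    constructor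
    · rintro (h | h)
      · exact Or.inr h.symm
      · exact Or.inl (hmem.mp (by omega))
    · rintro (h | h)
      · exact Or.inr (by have := hmem.mpr h; omega)
      · exact Or.inl h.symm
  have hlastD : cs.getD qn ' ' = cs[qn] := List.getD_eq_getElem cs ' ' hq'
  have hCq := hC qn hq'
  have hCp := hC pn (by omega)
  rw [hsub]
  simp only [pvGetMin, gm5, Int.toNat_natCast, hlastD, hCq, hCp, pcounts]
  simp only [List.getD, List.getElem?_cons_zero, List.getElem?_cons_succ, Option.getD_some]
  simp only [hcond]
  split_ifs with h1 h2 h3 h4 <;> try rfl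
  exfalso
  -- no nucleotide present in the slice: contradicted by either a mid-range char or a valid last char
  rcases hcnd with hlt | hval
  · have hlt' : pn < qn := by exact_mod_cast hlt
    have hlen : 0 < ((cs.take qn).drop pn).length := by
      simp only [List.length_drop, List.length_take]
      omega
    obtain ⟨c, hc⟩ := List.exists_mem_of_length_pos hlen
    have hcv := hdl c (mem_take_dropLast cs qn (by omega) (List.mem_of_mem_drop hc))
    rcases hcv with h | h | h | h <;> subst h
    · exact h1 (List.mem_append_left _ hc)
    · exact h2 (List.mem_append_left _ hc)
    · exact h3 (List.mem_append_left _ hc)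
    · exact h4 (List.mem_append_left _ hc)
  · simp only [Int.toNat_natCast] at hval
    rw [hlastD] at hval
    rcases inFactor_cases _ hval with h | h | h | h
    · exact h1 (List.mem_append_right _ (by simp [h]))
    · exact h2 (List.mem_append_right _ (by simp [h]))
    · exact h3 (List.mem_append_right _ (by simp [h]))
    · exact h4 (List.mem_append_right _ (by simp [h]))

-- the filtered slice is nonempty: a mid-range char (all valid) or the valid last char survives the filter
lemma filter_slice_ne_nil (cs : List Char)
    (hdl : ∀ c ∈ cs.dropLast, c = 'A' ∨ c = 'C' ∨ c = 'G' ∨ c = 'T') (p q : Int)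
    (hp : 0 ≤ p) (hpq : p ≤ q) (hq : q < (cs.length : Int))
    (hcnd : p < q ∨ pvInFactor (cs.getD q.toNat ' ') = true) :
    (PySem.List.slice cs (some p) (some (q + 1))).filter pvInFactor ≠ [] := by
  intro hnil
  rw [List.filter_eq_nil_iff] at hnil
  rw [slice_decomp cs p q hp hpq hq] at hnil
  rcases hcnd with hlt | hval
  · have hlen : 0 < ((cs.take q.toNat).drop p.toNat).length := by
      simp only [List.length_drop, List.length_take]
      omega
    obtain ⟨c, hc⟩ := List.exists_mem_of_length_pos hlen
    have hcv := hdl c (mem_take_dropLast cs q.toNat (by omega) (List.mem_of_mem_drop hc))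
    have := hnil c (List.mem_append_left _ hc)
    rcases hcv with h | h | h | h <;> simp [pvInFactor, h] at this
  · have hqlt : q.toNat < cs.length := by omega
    have hg : cs.getD q.toNat ' ' = cs[q.toNat] := List.getD_eq_getElem cs ' ' hqlt
    have := hnil (cs[q.toNat]'(by omega)) (List.mem_append_right _ (by simp))
    rw [hg] at hval
    exact this hval

-- ===== VERDICT (by name: the statement is the Claim_ definition above) =====
theorem solution_spec : Claim_equal_solution := by
  intro S P Q hdom hpre
  obtain ⟨hdlb, hlen, hbound⟩ := hpre
  have hdl : ∀ c ∈ S.toList.dropLast, c = 'A' ∨ c = 'C' ∨ c = 'G' ∨ c = 'T' := by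
    intro c hc
    exact inFactor_cases c (List.all_eq_true.mp hdlb c hc)
  unfold Spec_solution
  simp only [solution, solution_alt, PySem.List.foldl_append_singleton_eq_map, List.nil_append]
  apply List.ext_getElem
  · simp only [List.length_map, PySem.List.length_enumerate, List.length_zip]
    omega
  · intro i h1 h2
    have hiP : i < P.length := by
      simpa [PySem.List.length_enumerate] using h1
    have hiQ : i < Q.length := by omega
    simp only [List.getElem_map, PySem.List.getElem_enumerate, List.getElem_zip, zero_add,
      PySem.List.pyGetD_natCast]
    rw [List.getD_eq_getElem Q 0 hiQ]
    have hb := hbound i hiP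
    rw [List.getD_eq_getElem P 0 hiP, List.getD_eq_getElem Q 0 hiQ] at hb
    obtain ⟨hp, hpq, hq, hcnd⟩ := hb
    rw [getmin_eq S.toList _ (fun j hj => counters_spec S.toList hdl j hj) hdl
          P[i] Q[i] hp hpq hq hcnd,
        ← bval_eq_gm5 _ (filter_slice_ne_nil S.toList hdl P[i] Q[i] hp hpq hq hcnd)]
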